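-- pv_equiv track=rewrite | github.com/kThieb/Graph-Algorithms | algorithms/push_relabel.py | find_min_height
-- ===== SOURCE A (Python) =====
-- def find_min_height(height, u, forwardStar):
--     index = -1
--     min = float('inf')
--     for i in range(len(height)):
--         current = height[i]
--         if current < min and find_arc(forwardStar, u, i) >= 0:
--             min = current
--             index = i
--     return index
--
-- def find_arc(forwardStar, u, v):
--     current_arc_index = -1
--     for i in range(len(forwardStar)):
--         arc = forwardStar[i]
--         if arc[0] == u + 1 and arc[1] == v + 1:
--             current_arc_index = i
--             break
--     return current_arc_index
-- ===== SOURCE B (Python) =====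
-- def find_min_height(height, u, forwardStar):
--     n = len(height)
--     best = None  # (height[v], v), lexicographically minimal
--     for arc in forwardStar:
--         if len(arc) >= 2 and arc[0] == u + 1:
--             v = arc[1] - 1
--             if 0 <= v < n:
--                 cand = (height[v], v)
--                 if best is None or cand < best:
--                     best = cand
--     return -1 if best is None else best[1]
-- ===== Notes on version B (the rewrite author's own statement) =====
-- stated objective: faster
-- what changed: Instead of scanning every node index and running a linear find_arc search through forwardStar for each, B makes a single pass over forwardStar, keeping the arc target v (with 0 <= v < len(height), arc head u+1) that minimizes the tuple (height[v], v). Pre_ excludes inputs where A raises IndexError on a malformed arc (empty, or length-1 with head u+1) reached by find_arc; B skips such arcs.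
-- outside the precondition, e.g. on find_min_height([5], 0, [[1, 1], []]): A returns 0, B returns 0
import Mathlib
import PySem

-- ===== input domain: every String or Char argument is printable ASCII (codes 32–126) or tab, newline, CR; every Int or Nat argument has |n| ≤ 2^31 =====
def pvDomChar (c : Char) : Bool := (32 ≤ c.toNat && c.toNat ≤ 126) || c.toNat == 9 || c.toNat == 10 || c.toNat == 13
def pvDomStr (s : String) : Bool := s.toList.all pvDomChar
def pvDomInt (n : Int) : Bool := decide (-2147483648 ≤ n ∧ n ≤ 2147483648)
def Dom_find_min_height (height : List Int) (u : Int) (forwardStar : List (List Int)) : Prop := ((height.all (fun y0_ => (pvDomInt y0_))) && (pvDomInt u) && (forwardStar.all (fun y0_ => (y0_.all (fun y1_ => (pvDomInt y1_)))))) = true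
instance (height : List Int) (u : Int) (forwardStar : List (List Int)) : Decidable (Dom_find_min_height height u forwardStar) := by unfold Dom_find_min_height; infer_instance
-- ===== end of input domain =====

-- B replaces A's nested scan (every node index, with a linear find_arc search for each) by a
-- single pass over forwardStar keeping the lexicographically minimal (height[v], v); faster.

-- ===== PORT A =====
-- find_arc's loop over range(len(forwardStar)) with break; arc[0]/arc[1] are ported with
-- pyGet? + getD 0 (exact whenever Python does not raise; raising inputs are outside Pre_).
def findArcAux (u v : Int) : List (List Int) → Int → Int
  | [], _ => -1
  | arc :: rest, i =>
      if (PySem.List.pyGet? arc 0).getD 0 = u + 1 ∧ (PySem.List.pyGet? arc 1).getD 0 = v + 1 then i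
      else findArcAux u v rest (i + 1)

def find_arc (forwardStar : List (List Int)) (u v : Int) : Int := findArcAux u v forwardStar 0

-- the main loop over range(len(height)); min = float('inf') is modelled as `none`
-- ("current < inf" is always true); state (index, min).
def fmhAux (u : Int) (fs : List (List Int)) : List Int → Int → Int → Option Int → Int
  | [], _, idx, _ => idx
  | current :: t, i, idx, mn =>
      let lt : Bool := match mn with | none => true | some m => decide (current < m)
      if lt && decide (0 ≤ find_arc fs u i) then fmhAux u fs t (i + 1) i (some current)
      else fmhAux u fs t (i + 1) idx mn

def find_min_height (height : List Int) (u : Int) (forwardStar : List (List Int)) : Int :=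
  fmhAux u forwardStar height 0 (-1) none

-- ===== PORT B =====
-- Python's tuple comparison cand < best on int pairs
def ltP (p q : Int × Int) : Bool := p.1 < q.1 || (p.1 == q.1 && p.2 < q.2)

-- single pass over forwardStar; best = None | (height[v], v)
def fmhAltAux (height : List Int) (u : Int) : List (List Int) → Option (Int × Int) → Option (Int × Int)
  | [], best => best
  | arc :: rest, best =>
      match arc with
      | a :: b :: _ =>
          if a = u + 1 ∧ 0 ≤ b - 1 ∧ b - 1 < (height.length : Int) then
            let cand : Int × Int := ((PySem.List.pyGet? height (b - 1)).getD 0, b - 1)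
            match best with
            | none => fmhAltAux height u rest (some cand)
            | some bp =>
                if ltP cand bp then fmhAltAux height u rest (some cand)
                else fmhAltAux height u rest (some bp)
          else fmhAltAux height u rest best
      | _ => fmhAltAux height u rest best

def find_min_height_alt (height : List Int) (u : Int) (forwardStar : List (List Int)) : Int :=
  match fmhAltAux height u forwardStar none with
  | none => -1
  | some p => p.2

-- ===== PRECONDITION & SPEC =====
-- Pre_ excludes the inputs on which Python A raises IndexError in find_arc: a nonempty height
-- together with a malformed arc (empty, or of length 1 with head u+1).  This is slightly
-- narrower than the exact raise set: it also excludes inputs where such a malformed arc is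
-- never inspected because every find_arc call breaks on an earlier matching arc (cited).
def Pre_find_min_height (height : List Int) (u : Int) (forwardStar : List (List Int)) : Prop :=
  height = [] ∨ ∀ arc ∈ forwardStar, arc ≠ [] ∧ (arc.length = 1 → PySem.List.pyGet? arc 0 ≠ some (u + 1))
instance (height : List Int) (u : Int) (forwardStar : List (List Int)) : Decidable (Pre_find_min_height height u forwardStar) := by unfold Pre_find_min_height; infer_instance

def pvWitness_find_min_height : List Int × Int × List (List Int) := ([3, 1, 2], 0, [[1, 2], [1, 3], [2, 1]])

def Spec_find_min_height (height : List Int) (u : Int) (forwardStar : List (List Int)) (out : Int) : Prop := out = find_min_height_alt height u forwardStar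
instance (height : List Int) (u : Int) (forwardStar : List (List Int)) (out : Int) : Decidable (Spec_find_min_height height u forwardStar out) := by unfold Spec_find_min_height; infer_instance

-- ===== CLAIM (what is proved, stated in full; the proofs are below) =====
def Claim_equal_find_min_height : Prop := ∀ (height : List Int) (u : Int) (forwardStar : List (List Int)), Dom_find_min_height height u forwardStar → Pre_find_min_height height u forwardStar → Spec_find_min_height height u forwardStar (find_min_height height u forwardStar)

-- ===== LEMMAS AND PROOFS =====

theorem pg_zero {α : Type} (xs : List α) : PySem.List.pyGet? xs 0 = xs[0]? := by
  rw [show (0:Int) = ((0:Nat):Int) from rfl, PySem.List.pyGet?_natCast]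
theorem pg_one {α : Type} (xs : List α) : PySem.List.pyGet? xs 1 = xs[1]? := by
  rw [show (1:Int) = ((1:Nat):Int) from rfl, PySem.List.pyGet?_natCast]

-- lexicographic (non-strict) order on (height, index) pairs
def leP (p q : Int × Int) : Prop := p.1 < q.1 ∨ (p.1 = q.1 ∧ p.2 ≤ q.2)

def minP (b p : Int × Int) : Int × Int := if ltP p b then p else b
def upd (o : Option (Int × Int)) (p : Int × Int) : Option (Int × Int) :=
  match o with
  | none => some p
  | some b => some (minP b p)

def extractIdx (o : Option (Int × Int)) : Int :=
  match o with
  | none => -1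
  | some p => p.2

theorem foldl_minP_mem (L : List (Int × Int)) : ∀ b, L.foldl minP b ∈ b :: L := by
  induction L with
  | nil => intro b; simp [List.foldl]
  | cons p t ih =>
      intro b
      simp only [List.foldl]
      by_cases hlt : ltP p b
      · rw [show minP b p = p from if_pos hlt]
        rcases List.mem_cons.1 (ih p) with h | h; simp [h]; simp [h]
      · rw [show minP b p = b from if_neg hlt]
        rcases List.mem_cons.1 (ih b) with h | h; simp [h]; simp [h]

theorem foldl_minP_le (L : List (Int × Int)) : ∀ b, ∀ x ∈ b :: L, leP (L.foldl minP b) x := by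
  induction L with
  | nil =>
      intro b x hx
      simp at hx
      subst hx
      simp [List.foldl, leP]
  | cons p t ih =>
      intro b x hx
      simp only [List.foldl]
      have hle : ∀ y ∈ minP b p :: t, leP (t.foldl minP (minP b p)) y := ih (minP b p)
      have hminb : leP (minP b p) b := by
        unfold minP leP; split_ifs with h <;> simp [ltP] at * <;> omega
      have hminp : leP (minP b p) p := by
        unfold minP leP; split_ifs with h <;> simp [ltP] at * <;> omega
      have hself : leP (t.foldl minP (minP b p)) (minP b p) := hle _ (by simp)
      have htrans : ∀ a c d : Int × Int, leP a c → leP c d → leP a d := by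
        intro a c d h1 h2; unfold leP at *; omega
      rcases List.mem_cons.1 hx with h | h
      · subst h; exact htrans _ _ _ hself hminb
      · rcases List.mem_cons.1 h with h | h
        · subst h; exact htrans _ _ _ hself hminp
        · exact hle _ (by simp [h])

theorem leP_antisymm (p q : Int × Int) (h1 : leP p q) (h2 : leP q p) : p = q := by
  unfold leP at *
  have : p.1 = q.1 ∧ p.2 = q.2 := by omega
  exact Prod.ext this.1 this.2

theorem foldl_upd_some (L : List (Int × Int)) : ∀ b, L.foldl upd (some b) = some (L.foldl minP b) := by
  induction L with
  | nil => intro b; simp [List.foldl]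
  | cons p t ih => intro b; simp [List.foldl, upd, ih]

theorem foldl_upd_eq_of_mem_iff (L1 L2 : List (Int × Int))
    (h : ∀ x, x ∈ L1 ↔ x ∈ L2) : L1.foldl upd none = L2.foldl upd none := by
  match L1, L2 with
  | [], [] => rfl
  | [], q :: t2 => exact absurd ((h q).2 (by simp)) (by simp)
  | p :: t1, [] => exact absurd ((h p).1 (by simp)) (by simp)
  | p :: t1, q :: t2 =>
      simp only [List.foldl, upd, foldl_upd_some]
      have m1 := foldl_minP_mem t1 p
      have m2 := foldl_minP_mem t2 q
      have h12 : leP (t1.foldl minP p) (t2.foldl minP q) := foldl_minP_le t1 p _ ((h _).2 m2)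
      have h21 : leP (t2.foldl minP q) (t1.foldl minP p) := foldl_minP_le t2 q _ ((h _).1 m1)
      exact congrArg some (leP_antisymm _ _ h12 h21)

-- the pairs A's loop considers, in index order
def LA (u : Int) (fs : List (List Int)) : List Int → Int → List (Int × Int)
  | [], _ => []
  | h :: t, i => if 0 ≤ find_arc fs u i then (h, i) :: LA u fs t (i + 1) else LA u fs t (i + 1)

-- the pairs B's loop considers, in arc order
def LB (height : List Int) (u : Int) : List (List Int) → List (Int × Int)
  | [] => []
  | arc :: rest =>
      match arc with
      | a :: b :: _ =>
          if a = u + 1 ∧ 0 ≤ b - 1 ∧ b - 1 < (height.length : Int) then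
            ((PySem.List.pyGet? height (b - 1)).getD 0, b - 1) :: LB height u rest
          else LB height u rest
      | _ => LB height u rest

theorem fmhAux_eq_foldl (u : Int) (fs : List (List Int)) :
    ∀ (t : List Int) (i idx : Int) (mn : Option Int),
      (mn = none → idx = -1) → (∀ m, mn = some m → idx < i) →
      fmhAux u fs t i idx mn = extractIdx (List.foldl upd (mn.map (fun m => (m, idx))) (LA u fs t i)) := by
  intro t
  induction t with
  | nil =>
      intro i idx mn h1 h2
      cases mn with
      | none => simp [fmhAux, LA, extractIdx, h1 rfl]
      | some m => simp [fmhAux, LA, extractIdx]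
  | cons current t ih =>
      intro i idx mn h1 h2
      by_cases hr : 0 ≤ find_arc fs u i
      · cases mn with
        | none =>
            have step : fmhAux u fs (current :: t) i idx none = fmhAux u fs t (i + 1) i (some current) := by
              simp [fmhAux, hr]
            rw [step, ih (i + 1) i (some current) (fun h => nomatch h) (fun m _ => by omega)]
            simp only [LA, if_pos hr, Option.map_none, Option.map_some, List.foldl, upd]
        | some m =>
            by_cases hlt : current < m
            · have step : fmhAux u fs (current :: t) i idx (some m) = fmhAux u fs t (i + 1) i (some current) := by
                simp [fmhAux, hr, hlt]
              rw [step, ih (i + 1) i (some current) (fun h => nomatch h) (fun m' _ => by omega)]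
              have hl : ltP (current, i) (m, idx) := by simp [ltP]; omega
              have hmin : minP (m, idx) (current, i) = (current, i) := by
                unfold minP; rw [if_pos hl]
              simp only [LA, if_pos hr, Option.map_some, List.foldl, upd, hmin]
            · have step : fmhAux u fs (current :: t) i idx (some m) = fmhAux u fs t (i + 1) idx (some m) := by
                simp [fmhAux, hlt]
              rw [step, ih (i + 1) idx (some m) (fun h => nomatch h)
                    (fun m' _ => by have := h2 m rfl; omega)]
              have hidx : idx < i := h2 m rfl
              have hnl : ¬ (ltP (current, i) (m, idx) = true) := by simp [ltP]; omega
              have hmin : minP (m, idx) (current, i) = (m, idx) := by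
                unfold minP; rw [if_neg hnl]
              simp only [LA, if_pos hr, Option.map_some, List.foldl, upd, hmin]
      · have step : fmhAux u fs (current :: t) i idx mn = fmhAux u fs t (i + 1) idx mn := by
          cases mn <;> simp [fmhAux, hr]
        rw [step, ih (i + 1) idx mn h1 (fun m hm => by have := h2 m hm; omega)]
        simp only [LA, if_neg hr]

theorem fmhAltAux_eq_foldl (height : List Int) (u : Int) :
    ∀ (fs : List (List Int)) (best : Option (Int × Int)),
      fmhAltAux height u fs best = List.foldl upd best (LB height u fs) := by
  intro fs
  induction fs with
  | nil => intro best; simp [fmhAltAux, LB]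
  | cons arc rest ih =>
      intro best
      rcases arc with _ | ⟨a, _ | ⟨b, r2⟩⟩
      · simpa [fmhAltAux, LB] using ih best
      · simpa [fmhAltAux, LB] using ih best
      · by_cases hc : a = u + 1 ∧ 0 ≤ b - 1 ∧ b - 1 < (height.length : Int)
        · cases best with
          | none =>
              simp only [fmhAltAux, if_pos hc, LB, List.foldl, upd]
              exact ih _
          | some bp =>
              simp only [fmhAltAux, if_pos hc, LB, List.foldl, upd, minP]
              split_ifs with h <;> exact ih _
        · cases best <;> simp only [fmhAltAux, if_neg hc, LB] <;> exact ih _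

theorem findArcAux_nonneg (u v : Int) :
    ∀ (fs : List (List Int)) (i : Int), 0 ≤ i →
      (0 ≤ findArcAux u v fs i ↔
        ∃ arc ∈ fs, (PySem.List.pyGet? arc 0).getD 0 = u + 1 ∧ (PySem.List.pyGet? arc 1).getD 0 = v + 1) := by
  intro fs
  induction fs with
  | nil =>
      intro i hi
      simp only [findArcAux]
      constructor
      · intro h; exact absurd h (by omega)
      · rintro ⟨a, ha, _⟩; simp at ha
  | cons arc rest ih =>
      intro i hi
      by_cases hc : (PySem.List.pyGet? arc 0).getD 0 = u + 1 ∧ (PySem.List.pyGet? arc 1).getD 0 = v + 1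
      · simp only [findArcAux, if_pos hc]
        constructor
        · intro _; exact ⟨arc, by simp, hc⟩
        · intro _; exact hi
      · simp only [findArcAux, if_neg hc]
        rw [ih (i + 1) (by omega)]
        constructor
        · rintro ⟨a, ha, h⟩; exact ⟨a, by simp [ha], h⟩
        · rintro ⟨a, ha, h⟩
          rcases List.mem_cons.1 ha with rfl | ha
          · exact absurd h hc
          · exact ⟨a, ha, h⟩

theorem find_arc_iff (fs : List (List Int)) (u v : Int) (hv : 0 ≤ v) :
    0 ≤ find_arc fs u v ↔ ∃ a b r2, (a :: b :: r2) ∈ fs ∧ a = u + 1 ∧ b = v + 1 := by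
  rw [show find_arc fs u v = findArcAux u v fs 0 from rfl, findArcAux_nonneg u v fs 0 (by omega)]
  constructor
  · rintro ⟨arc, harc, h1, h2⟩
    match arc with
    | [] =>
        rw [pg_one] at h2
        simp at h2
        omega
    | [a] =>
        rw [pg_one] at h2
        simp at h2
        omega
    | a :: b :: r2 =>
        rw [pg_zero] at h1
        rw [pg_one] at h2
        simp at h1 h2
        exact ⟨a, b, r2, harc, h1, h2⟩
  · rintro ⟨a, b, r2, harc, rfl, rfl⟩
    exact ⟨_, harc, by simp [pg_zero], by simp⟩

theorem mem_LA (u : Int) (fs : List (List Int)) :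
    ∀ (t : List Int) (i : Int) (p : Int × Int),
      p ∈ LA u fs t i ↔ ∃ j : Nat, t[j]? = some p.1 ∧ p.2 = i + j ∧ 0 ≤ find_arc fs u (i + j) := by
  intro t
  induction t with
  | nil => intro i p; simp [LA]
  | cons h t ih =>
      intro i p
      simp only [LA]
      by_cases hr : 0 ≤ find_arc fs u i
      · rw [if_pos hr, List.mem_cons, ih (i + 1) p]
        constructor
        · rintro (rfl | ⟨j, h1, h2, h3⟩)
          · exact ⟨0, rfl, by simp, by simpa using hr⟩
          · refine ⟨j + 1, ?_, ?_, ?_⟩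
            · simpa using h1
            · push_cast; omega
            · have e : i + (((j : Nat) : Int) + 1) = (i + 1) + j := by omega
              push_cast
              rw [e]
              exact h3
        · rintro ⟨j, h1, h2, h3⟩
          cases j with
          | zero =>
              left
              have hp1 : p.1 = h := by simpa using h1.symm
              have hp2 : p.2 = i := by simpa using h2
              exact Prod.ext hp1 hp2
          | succ j =>
              right
              refine ⟨j, ?_, ?_, ?_⟩
              · simpa using h1
              · push_cast at h2 ⊢; omega
              · have e : i + (((j : Nat) : Int) + 1) = (i + 1) + j := by omega
                push_cast at h3
                rw [e] at h3
                exact h3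
      · rw [if_neg hr, ih (i + 1) p]
        constructor
        · rintro ⟨j, h1, h2, h3⟩
          refine ⟨j + 1, by simpa using h1, by push_cast; omega, ?_⟩
          have e : i + (((j : Nat) : Int) + 1) = (i + 1) + j := by omega
          push_cast
          rw [e]
          exact h3
        · rintro ⟨j, h1, h2, h3⟩
          cases j with
          | zero => exact absurd (by simpa using h3) hr
          | succ j =>
              refine ⟨j, by simpa using h1, ?_, ?_⟩
              · push_cast at h2 ⊢; omega
              · have e : i + (((j : Nat) : Int) + 1) = (i + 1) + j := by omega
                push_cast at h3
                rw [e] at h3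
                exact h3

theorem mem_LB (height : List Int) (u : Int) :
    ∀ (fs : List (List Int)) (p : Int × Int),
      p ∈ LB height u fs ↔ ∃ a b r2, (a :: b :: r2) ∈ fs ∧ a = u + 1 ∧ 0 ≤ b - 1 ∧ b - 1 < (height.length : Int) ∧
        p = ((PySem.List.pyGet? height (b - 1)).getD 0, b - 1) := by
  intro fs
  induction fs with
  | nil => intro p; simp [LB]
  | cons arc rest ih =>
      intro p
      rcases arc with _ | ⟨a, _ | ⟨b, r2⟩⟩
      · simp only [LB]
        rw [ih]
        constructor
        · rintro ⟨a', b', r2', hm, h4, h5, h6, h7⟩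
          exact ⟨a', b', r2', List.mem_cons_of_mem _ hm, h4, h5, h6, h7⟩
        · rintro ⟨a', b', r2', hm, h4, h5, h6, h7⟩
          rcases List.mem_cons.1 hm with heq | hm
          · exact absurd heq (List.cons_ne_nil _ _)
          · exact ⟨a', b', r2', hm, h4, h5, h6, h7⟩
      · simp only [LB]
        rw [ih]
        constructor
        · rintro ⟨a', b', r2', hm, h4, h5, h6, h7⟩
          exact ⟨a', b', r2', List.mem_cons_of_mem _ hm, h4, h5, h6, h7⟩
        · rintro ⟨a', b', r2', hm, h4, h5, h6, h7⟩
          rcases List.mem_cons.1 hm with heq | hm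
          · injection heq with _ htl; exact absurd htl (List.cons_ne_nil _ _)
          · exact ⟨a', b', r2', hm, h4, h5, h6, h7⟩
      · simp only [LB]
        by_cases hc : a = u + 1 ∧ 0 ≤ b - 1 ∧ b - 1 < (height.length : Int)
        · rw [if_pos hc, List.mem_cons, ih]
          constructor
          · rintro (rfl | ⟨a', b', r2', hm, h4, h5, h6, h7⟩)
            · exact ⟨a, b, r2, by simp, hc.1, hc.2.1, hc.2.2, rfl⟩
            · exact ⟨a', b', r2', List.mem_cons_of_mem _ hm, h4, h5, h6, h7⟩
          · rintro ⟨a', b', r2', hm, h4, h5, h6, h7⟩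
            rcases List.mem_cons.1 hm with heq | hm
            · left
              injection heq with ha htl
              injection htl with hb _
              subst ha; subst hb
              exact h7
            · right; exact ⟨a', b', r2', hm, h4, h5, h6, h7⟩
        · rw [if_neg hc, ih]
          constructor
          · rintro ⟨a', b', r2', hm, h4, h5, h6, h7⟩
            exact ⟨a', b', r2', List.mem_cons_of_mem _ hm, h4, h5, h6, h7⟩
          · rintro ⟨a', b', r2', hm, h4, h5, h6, h7⟩
            rcases List.mem_cons.1 hm with heq | hm
            · exfalso
              injection heq with ha htl
              injection htl with hb _
              subst ha; subst hb
              exact hc ⟨h4, h5, h6⟩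
            · exact ⟨a', b', r2', hm, h4, h5, h6, h7⟩

theorem mem_iff (height : List Int) (u : Int) (fs : List (List Int)) (p : Int × Int) :
    p ∈ LA u fs height 0 ↔ p ∈ LB height u fs := by
  rw [mem_LA, mem_LB]
  constructor
  · rintro ⟨j, h1, h2, h3⟩
    rcases (find_arc_iff fs u (0 + j) (by omega)).1 h3 with ⟨a, b, r2, hm, ha, hb⟩
    have hjlen : j < height.length := (List.getElem?_eq_some_iff.1 h1).1
    have hb1 : b - 1 = (j : Int) := by omega
    refine ⟨a, b, r2, hm, ha, by omega, by rw [hb1]; exact_mod_cast hjlen, ?_⟩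
    have hget : PySem.List.pyGet? height (b - 1) = height[j]? := by
      rw [hb1, PySem.List.pyGet?_natCast]
    refine Prod.ext ?_ ?_
    · rw [hget, h1]; rfl
    · omega
  · rintro ⟨a, b, r2, hm, ha, h5, h6, h7⟩
    obtain ⟨k, hk⟩ : ∃ k : Nat, b - 1 = (k : Int) := ⟨(b - 1).toNat, by omega⟩
    rw [hk] at h6 h7
    have hklen : k < height.length := by exact_mod_cast h6
    refine ⟨k, ?_, ?_, ?_⟩
    · rw [h7]
      simp [List.getElem?_eq_getElem hklen]
    · rw [h7]; simp
    · exact (find_arc_iff fs u (0 + (k : Int)) (by omega)).2 ⟨a, b, r2, hm, ha, by omega⟩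

-- ===== VERDICT (by name: the statement is the Claim_ definition above) =====
theorem find_min_height_spec : Claim_equal_find_min_height := by
  intro height u fs _ _
  unfold Spec_find_min_height find_min_height find_min_height_alt
  rw [fmhAux_eq_foldl u fs height 0 (-1) none (fun _ => rfl) (fun m h => nomatch h),
      fmhAltAux_eq_foldl height u fs none]
  simp only [Option.map_none]
  rw [foldl_upd_eq_of_mem_iff _ _ (mem_iff height u fs)]
  cases List.foldl upd none (LB height u fs) <;> rfl
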